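-- pv_equiv track=rewrite | github.com/chemplusx/BioMed-KAI | biomedkai-backend/src/tools/medical_tools/symptom_analyzer.py | _generate_system_review
-- ===== SOURCE A (Python) =====
-- from typing import Dict, List, Any, Optional
--
-- def _generate_system_review(analyzed_symptoms: List[Dict[str, Any]]) -> Dict[str, List[str]]:
--     """Generate review of systems"""
--     system_review = {}
--
--     for symptom in analyzed_symptoms:
--         category = symptom["category"]
--         if category not in system_review:
--             system_review[category] = []
--         system_review[category].append(symptom["symptom"])
--
--     return system_review
-- ===== SOURCE B (Python) =====
-- def _generate_system_review(analyzed_symptoms):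
--     """Generate review of systems"""
--     categories = list(dict.fromkeys(s["category"] for s in analyzed_symptoms))
--     return {c: [s["symptom"] for s in analyzed_symptoms if s["category"] == c]
--             for c in categories}
-- ===== Notes on version B (the rewrite author's own statement) =====
-- stated objective: alternative
-- what changed: Replaces A's single fold that tests membership and appends into a growing dict by a two-phase pass: first collect the distinct categories in first-seen order (dict.fromkeys), then build each group with one filtering comprehension per category.
import Mathlib
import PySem

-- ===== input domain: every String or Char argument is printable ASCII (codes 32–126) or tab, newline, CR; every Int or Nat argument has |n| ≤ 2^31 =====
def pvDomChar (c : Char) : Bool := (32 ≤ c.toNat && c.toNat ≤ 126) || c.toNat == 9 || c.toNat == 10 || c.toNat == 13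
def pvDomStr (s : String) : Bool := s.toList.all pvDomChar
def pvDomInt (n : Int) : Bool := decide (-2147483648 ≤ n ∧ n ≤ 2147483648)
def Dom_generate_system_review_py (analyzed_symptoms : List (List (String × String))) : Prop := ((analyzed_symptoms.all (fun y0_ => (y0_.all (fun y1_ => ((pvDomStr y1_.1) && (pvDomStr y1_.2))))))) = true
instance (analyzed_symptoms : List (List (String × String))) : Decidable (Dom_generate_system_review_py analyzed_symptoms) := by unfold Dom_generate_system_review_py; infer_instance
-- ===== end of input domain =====

-- B replaces A's one-pass membership-test-and-append grouping by a two-phase pass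
-- (first-seen distinct categories, then one filtering pass per category); alternative
-- decomposition, same return value (including key order).


-- ===== PORT A =====
-- symptom["category"] / symptom["symptom"]: first-match lookup in the association list
-- (Python raises KeyError when absent — the `none` branches below, excluded by Pre_).
def generate_system_review_py (analyzed_symptoms : List (List (String × String))) : List (String × List String) :=
  (analyzed_symptoms.foldl (fun system_review symptom =>
      match (PySem.Dict.mk symptom).get? "category" with
      | none => system_review          -- KeyError (outside Pre_)
      | some category =>
        let d1 := if system_review.contains category then system_review
                  else system_review.insert category ([] : List String)
        match (PySem.Dict.mk symptom).get? "symptom" with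
        | none => d1                   -- KeyError (outside Pre_)
        | some v => d1.modify category [] (fun l => l ++ [v]))
    PySem.Dict.empty).items

-- ===== PORT B =====
-- list(dict.fromkeys(...)) = PySem.List.dedup; then one filtering pass per category.
def generate_system_review_py_alt (analyzed_symptoms : List (List (String × String))) : List (String × List String) :=
  let categories := PySem.List.dedup
    (analyzed_symptoms.filterMap (fun s => (PySem.Dict.mk s).get? "category"))
  categories.map (fun c =>
    (c, analyzed_symptoms.filterMap (fun s =>
          if (PySem.Dict.mk s).get? "category" = some c
          then (PySem.Dict.mk s).get? "symptom" else none)))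

-- ===== PRECONDITION & SPEC =====
-- Pre_ excludes exactly the inputs on which Python A raises KeyError: a symptom dict
-- missing the "category" or "symptom" key.
def Pre_generate_system_review_py (analyzed_symptoms : List (List (String × String))) : Prop :=
  ∀ s ∈ analyzed_symptoms,
    ((PySem.Dict.mk s).get? "category").isSome = true ∧
    ((PySem.Dict.mk s).get? "symptom").isSome = true
instance (analyzed_symptoms : List (List (String × String))) : Decidable (Pre_generate_system_review_py analyzed_symptoms) := by unfold Pre_generate_system_review_py; infer_instance

def pvWitness_generate_system_review_py : (List (List (String × String))) :=
  [[("category", "neuro"), ("symptom", "headache")],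
   [("category", "gi"), ("symptom", "nausea")],
   [("category", "neuro"), ("symptom", "dizziness")]]

def Spec_generate_system_review_py (analyzed_symptoms : List (List (String × String))) (out : List (String × List String)) : Prop := out = generate_system_review_py_alt analyzed_symptoms
instance (analyzed_symptoms : List (List (String × String))) (out : List (String × List String)) : Decidable (Spec_generate_system_review_py analyzed_symptoms out) := by unfold Spec_generate_system_review_py; infer_instance

-- ===== CLAIM (what is proved, stated in full; the proofs are below) =====
def Claim_equal_generate_system_review_py : Prop := ∀ (analyzed_symptoms : List (List (String × String))), Dom_generate_system_review_py analyzed_symptoms → Pre_generate_system_review_py analyzed_symptoms → Spec_generate_system_review_py analyzed_symptoms (generate_system_review_py analyzed_symptoms)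

-- ===== LEMMAS AND PROOFS =====

-- the category / symptom value of a dict satisfying Pre_ (getD "" is only a total representative)
def pvCat (s : List (String × String)) : String := ((PySem.Dict.mk s).get? "category").getD ""
def pvSym (s : List (String × String)) : String := ((PySem.Dict.mk s).get? "symptom").getD ""

-- A's loop body on a present lookup IS a Dict.modify (insert-[] -then-append collapses)
theorem stepA_eq_modify (d : PySem.Dict String (List String)) (c v : String) :
    (match some v with
     | none => (if d.contains c then d else d.insert c ([] : List String))
     | some v => (if d.contains c then d else d.insert c ([] : List String)).modify c [] (fun l => l ++ [v]))
    = d.modify c [] (fun l => l ++ [v]) := by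
  show (if d.contains c then d else d.insert c ([] : List String)).modify c [] (fun l => l ++ [v])
      = d.modify c [] (fun l => l ++ [v])
  by_cases h : d.contains c = true
  · simp [h]
  · rw [Bool.not_eq_true] at h
    simp only [h, Bool.false_eq_true, if_false, PySem.Dict.modify,
      PySem.Dict.getD_insert_self, PySem.Dict.getD_of_not_contains _ _ h]
    -- (d.insert c []).insert c [v] = d.insert c [v] when c is fresh in d
    have hforall : ∀ p ∈ d.items, (p.1 == c) = false := by
      intro p hp
      by_contra hne
      have : d.contains c = true := by
        have h1 : (p.1 == c) = true := by simpa using hne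
        have : p.1 = c := by simpa using h1
        subst this
        have := PySem.Dict.contains_iff_mem_keys (d := d) (k := p.1)
        exact this.mpr (PySem.Dict.mem_keys_of_mem_items d hp)
      rw [this] at h; cases h
    apply PySem.Dict.ext
    rw [PySem.Dict.items_insert_of_contains _ _ (PySem.Dict.contains_insert_self _ _ _),
        PySem.Dict.items_insert_of_not_contains _ _ h,
        PySem.Dict.items_insert_of_not_contains _ ([] ++ [v]) h]
    simp only [List.map_append]
    congr 1
    · conv_rhs => rw [← List.map_id d.items]
      exact List.map_congr_left (fun p hp => by simp [hforall p hp])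
    · simp

-- items of a Nodup-keyed dict, written as a map over its keys
theorem items_eq_map_keys {ν : Type} (d : PySem.Dict String ν) (v0 : ν) (h : d.keys.Nodup) :
    d.items = d.keys.map (fun k => (k, d.getD k v0)) := by
  show d.items = (d.items.map (fun p => p.1)).map (fun k => (k, d.getD k v0))
  rw [List.map_map]
  conv_lhs => rw [← List.map_id d.items]
  apply List.map_congr_left
  intro p hp
  obtain ⟨k, v⟩ := p
  simp [PySem.Dict.getD_of_mem_items d hp h v0]

-- grouping fold over explicit (category, symptom) pairs, characterised
theorem group_items (ps : List (String × String)) :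
    (ps.foldl (fun d p => d.modify p.1 [] (fun l => l ++ [p.2])) PySem.Dict.empty).items
    = (PySem.List.dedup (ps.map Prod.fst)).map
        (fun c => (c, (ps.filter (fun p => p.1 == c)).map Prod.snd)) := by
  have hkeys : (ps.foldl (fun d p => d.modify p.1 [] (fun l => l ++ [p.2])) PySem.Dict.empty).keys
      = PySem.List.dedup (ps.map Prod.fst) := by
    have := PySem.Dict.keys_foldl_modify_key ps Prod.fst ([] : List String)
      (fun _ p => (fun l => l ++ [p.2])) PySem.Dict.empty
    simpa [PySem.Dict.keys_empty, PySem.List.dedup_eq_ofList, PySem.Set.ofList,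
      PySem.Set.update] using this
  have hnodup : (ps.foldl (fun d p => d.modify p.1 [] (fun l => l ++ [p.2])) PySem.Dict.empty).keys.Nodup := by
    exact PySem.Dict.nodup_keys_foldl_modify_key ps Prod.fst ([] : List String)
      (fun _ p => (fun l => l ++ [p.2])) PySem.Dict.empty (by simp [PySem.Dict.keys_empty])
  rw [items_eq_map_keys _ ([] : List String) hnodup, hkeys]
  apply List.map_congr_left
  intro c _
  have := PySem.Dict.getD_foldl_modify_append ps PySem.Dict.empty c
  simp only [PySem.Dict.getD_empty, List.nil_append] at this
  simp [this]

-- B's per-category filterMap over pairs equals filter-then-map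
theorem filterMap_pair_eq (ps : List (String × String)) (c : String) :
    ps.filterMap (fun p => if p.1 = c then some p.2 else none)
    = (ps.filter (fun p => p.1 == c)).map Prod.snd := by
  induction ps with
  | nil => rfl
  | cons p t ih =>
    by_cases h : p.1 = c
    · simp [h, ih]
    · simp [h, ih]

-- ===== VERDICT (by name: the statement is the Claim_ definition above) =====
theorem generate_system_review_py_spec : Claim_equal_generate_system_review_py := by
  intro xs _ hpre
  unfold Spec_generate_system_review_py
  have hcat : ∀ s ∈ xs, (PySem.Dict.mk s).get? "category" = some (pvCat s) := by
    intro s hs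
    have := (hpre s hs).1
    unfold pvCat
    cases hget : (PySem.Dict.mk s).get? "category" with
    | none => rw [hget] at this; simp at this
    | some v => simp
  have hsym : ∀ s ∈ xs, (PySem.Dict.mk s).get? "symptom" = some (pvSym s) := by
    intro s hs
    have := (hpre s hs).2
    unfold pvSym
    cases hget : (PySem.Dict.mk s).get? "symptom" with
    | none => rw [hget] at this; simp at this
    | some v => simp
  -- reduce A to the grouping fold over pairs
  have hA : generate_system_review_py xs
      = ((xs.map (fun s => (pvCat s, pvSym s))).foldl
          (fun d p => d.modify p.1 [] (fun l => l ++ [p.2])) PySem.Dict.empty).items := by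
    unfold generate_system_review_py
    rw [List.foldl_map]
    congr 1
    apply PySem.List.foldl_congr_mem
    intro d s hs
    rw [hcat s hs, hsym s hs]
    exact stepA_eq_modify d (pvCat s) (pvSym s)
  -- reduce B to the same normal form
  have hcats : xs.filterMap (fun s => (PySem.Dict.mk s).get? "category") = xs.map pvCat :=
    List.filterMap_eq_map_iff_forall_eq_some.mpr hcat
  have hB : generate_system_review_py_alt xs
      = (PySem.List.dedup ((xs.map (fun s => (pvCat s, pvSym s))).map Prod.fst)).map
          (fun c => (c, ((xs.map (fun s => (pvCat s, pvSym s))).filter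
              (fun p => p.1 == c)).map Prod.snd)) := by
    unfold generate_system_review_py_alt
    simp only [hcats, List.map_map]
    have hfst : (Prod.fst ∘ fun s => (pvCat s, pvSym s)) = pvCat := rfl
    rw [hfst]
    apply List.map_congr_left
    intro c _
    congr 1
    rw [← filterMap_pair_eq ((xs.map (fun s => (pvCat s, pvSym s)))) c, List.filterMap_map]
    apply List.filterMap_congr
    intro s hs
    by_cases h : pvCat s = c
    · simp [Function.comp, h, hcat s hs, hsym s hs]
    · simp [Function.comp, h, hcat s hs]
  rw [hA, hB, group_items]
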